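-- pv_equiv track=rewrite | github.com/cooleyky/QAQC_Sandbox | Data_Review/Data_Availability/scripts/utils.py | parse_catalog
-- ===== SOURCE A (Python) =====
-- def parse_catalog(catalog, exclude=[]):
--     """
--     Parses the THREDDS catalog for the netCDF files. The exclude
--     argument takes in a list of strings to check a given catalog
--     item against and, if in the item, not return it.
--     """
--     datasets = [citem for citem in catalog if citem.endswith('.nc')]
--     if type(exclude) is not list:
--         raise ValueError(f'arg exclude must be a list')
--     for ex in exclude:
--         if type(ex) is not str:
--             raise ValueError(f'Element {ex} of exclude must be a string.')
--         datasets = [dset for dset in datasets if ex not in dset]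
--     return datasets
-- ===== SOURCE B (Python) =====
-- def parse_catalog(catalog, exclude=[]):
--     """Single explicit pass over catalog with a break/else inner scan,
--     instead of rebuilding the dataset list once per exclude string."""
--     if type(exclude) is not list:
--         raise ValueError(f'arg exclude must be a list')
--     for ex in exclude:
--         if type(ex) is not str:
--             raise ValueError(f'Element {ex} of exclude must be a string.')
--     out = []
--     for item in catalog:
--         if not item.endswith('.nc'):
--             continue
--         for ex in exclude:
--             if ex in item:
--                 break
--         else:
--             out.append(item)
--     return out
-- ===== Notes on version B (the rewrite author's own statement) =====
-- stated objective: simpler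
-- what changed: Replaces A's staged per-exclude re-filtering passes (one new intermediate list per exclude string) with a single explicit loop over catalog that skips non-'.nc' items and appends an item only if the inner scan over exclude finds no substring match (for/else with break); validation runs up front in the same order.
import Mathlib
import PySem

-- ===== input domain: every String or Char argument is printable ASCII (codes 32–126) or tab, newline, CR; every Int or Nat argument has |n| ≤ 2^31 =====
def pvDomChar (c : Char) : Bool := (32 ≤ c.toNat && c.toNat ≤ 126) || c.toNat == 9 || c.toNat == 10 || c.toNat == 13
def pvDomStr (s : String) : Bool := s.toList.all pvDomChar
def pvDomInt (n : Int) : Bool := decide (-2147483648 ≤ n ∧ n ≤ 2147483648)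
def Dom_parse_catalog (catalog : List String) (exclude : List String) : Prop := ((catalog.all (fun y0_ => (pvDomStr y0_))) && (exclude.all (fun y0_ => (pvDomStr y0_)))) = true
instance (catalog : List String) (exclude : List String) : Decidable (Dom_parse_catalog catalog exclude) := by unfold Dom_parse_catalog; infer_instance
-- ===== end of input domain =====

-- B replaces A's staged per-exclude re-filtering passes with one explicit recursion over
-- catalog whose inner scan over exclude breaks at the first match (objective: simpler).
-- ===== PORT A =====
def parse_catalog (catalog : List String) (exclude : List String) : List String :=
  let datasets := catalog.filter (fun citem => PySem.Str.endswith citem ".nc")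
  exclude.foldl (fun ds ex => ds.filter (fun dset => !PySem.Str.isIn ex dset)) datasets

-- ===== PORT B =====
-- inner 'for ex in exclude: if ex in item: break / else: keep' scan of Source B
def pvKeepItem (item : String) : List String → Bool
  | [] => true
  | ex :: rest => if PySem.Str.isIn ex item then false else pvKeepItem item rest

def parse_catalog_alt (catalog : List String) (exclude : List String) : List String :=
  match catalog with
  | [] => []
  | item :: rest =>
      if !PySem.Str.endswith item ".nc" then parse_catalog_alt rest exclude
      else if pvKeepItem item exclude then item :: parse_catalog_alt rest exclude
      else parse_catalog_alt rest exclude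

-- ===== PRECONDITION & SPEC =====
def Spec_parse_catalog (catalog : List String) (exclude : List String) (out : List String) : Prop := out = parse_catalog_alt catalog exclude
instance (catalog : List String) (exclude : List String) (out : List String) : Decidable (Spec_parse_catalog catalog exclude out) := by unfold Spec_parse_catalog; infer_instance

-- ===== CLAIM (what is proved, stated in full; the proofs are below) =====
def Claim_equal_parse_catalog : Prop := ∀ (catalog : List String) (exclude : List String), Dom_parse_catalog catalog exclude → Spec_parse_catalog catalog exclude (parse_catalog catalog exclude)

-- ===== LEMMAS AND PROOFS =====

-- the early-breaking inner scan decides the conjunction of the non-membership tests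
theorem pvKeepItem_eq_all (item : String) (exclude : List String) :
    pvKeepItem item exclude = exclude.all (fun ex => !PySem.Str.isIn ex item) := by
  induction exclude with
  | nil => rfl
  | cons e t ih =>
      simp only [pvKeepItem, List.all_cons, ih]
      by_cases h : PySem.Str.isIn e item <;> simp

-- B's recursion computes the single filter by the conjoined predicate
theorem alt_eq_filter (catalog exclude : List String) :
    parse_catalog_alt catalog exclude
      = catalog.filter (fun item =>
          PySem.Str.endswith item ".nc" && exclude.all (fun ex => !PySem.Str.isIn ex item)) := by
  induction catalog with
  | nil => rfl
  | cons item rest ih =>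
      simp only [parse_catalog_alt, ih, List.filter_cons, pvKeepItem_eq_all]
      cases h1 : PySem.Str.endswith item ".nc" <;>
        cases h2 : exclude.all (fun ex => !PySem.Str.isIn ex item) <;>
          simp only [Bool.not_true, Bool.not_false, Bool.true_and, Bool.false_and,
            if_true, if_false, Bool.false_eq_true]

-- folding per-exclude filters equals one filter by the conjunction of all predicates
theorem foldl_filter_eq_filter_all (exclude ds : List String) :
    exclude.foldl (fun ds ex => ds.filter (fun dset => !PySem.Str.isIn ex dset)) ds
      = ds.filter (fun d => exclude.all (fun ex => !PySem.Str.isIn ex d)) := by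
  induction exclude generalizing ds with
  | nil => simp
  | cons e t ih =>
      simp only [List.foldl_cons, ih, List.filter_filter, List.all_cons]
      congr 1
      funext d
      exact (Bool.and_comm _ _)

-- ===== VERDICT (by name: the statement is the Claim_ definition above) =====
theorem parse_catalog_spec : Claim_equal_parse_catalog := by
  intro catalog exclude _
  show parse_catalog catalog exclude = parse_catalog_alt catalog exclude
  unfold parse_catalog
  rw [foldl_filter_eq_filter_all, List.filter_filter, alt_eq_filter]
  congr 1
  funext item
  exact (Bool.and_comm _ _)
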